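-- pv_equiv track=rewrite | github.com/leon-vv/Traceon | traceon/mesher.py | _compute_vertex_to_indices
-- ===== SOURCE A (Python) =====
-- from typing import Dict
--
-- def _compute_vertex_to_indices(elements):
--     # elements is either a list of line or triangles
--     # containing indices into the points array
--
--     vertex_to_indices: Dict[int, list] = {}
--
--     for index, el in enumerate(elements):
--         for vertex in el:
--             if vertex not in vertex_to_indices:
--                 vertex_to_indices[vertex] = []
--             vertex_to_indices[vertex].append(index)
--
--     return vertex_to_indices
-- ===== SOURCE B (Python) =====
-- def _compute_vertex_to_indices(elements):
--     # Flatten to (vertex, element-index) pairs, dedupe vertices in first-appearance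
--     # order, then scatter the indices into per-vertex buckets via a rank table.
--     pairs = [(v, i) for i, el in enumerate(elements) for v in el]
--     keys = list(dict.fromkeys(v for v, _ in pairs))
--     rank = {v: j for j, v in enumerate(keys)}
--     buckets = [[] for _ in keys]
--     for v, i in pairs:
--         buckets[rank[v]].append(i)
--     return {v: b for v, b in zip(keys, buckets)}
-- ===== Notes on version B (the rewrite author's own statement) =====
-- stated objective: alternative
-- what changed: Replaces A's incremental dict-of-lists construction with three separate passes: flatten to (vertex, element-index) pairs, dedupe vertices in first-appearance order into a rank table, then scatter the indices into a pre-allocated bucket array and zip keys with buckets.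
import Mathlib
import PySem

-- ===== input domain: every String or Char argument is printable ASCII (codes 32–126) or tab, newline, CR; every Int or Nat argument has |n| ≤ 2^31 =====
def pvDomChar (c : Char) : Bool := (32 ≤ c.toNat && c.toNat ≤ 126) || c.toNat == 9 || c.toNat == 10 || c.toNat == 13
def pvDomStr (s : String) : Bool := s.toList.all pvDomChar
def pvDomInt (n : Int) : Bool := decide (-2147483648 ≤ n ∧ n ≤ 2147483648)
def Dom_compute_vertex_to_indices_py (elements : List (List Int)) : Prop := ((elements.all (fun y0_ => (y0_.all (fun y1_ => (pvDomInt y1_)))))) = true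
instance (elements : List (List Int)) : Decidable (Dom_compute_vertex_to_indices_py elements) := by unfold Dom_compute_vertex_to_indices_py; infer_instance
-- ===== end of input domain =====

-- B replaces A's incremental dict-building with flatten-to-(vertex,index) pairs, an ordered
-- dedup of the vertices, and one scatter pass into per-vertex buckets via a rank table
-- (alternative decomposition; same linear cost).

-- ===== PORT A =====
-- A's inner-loop body: 'if vertex not in d: d[vertex] = []' then 'd[vertex].append(index)'
def cviStep (index : Int) (d : PySem.Dict Int (List Int)) (vertex : Int) : PySem.Dict Int (List Int) :=
  let d' := if d.contains vertex then d else d.insert vertex []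
  d'.modify vertex [] (fun l => l ++ [index])

def compute_vertex_to_indices_py (elements : List (List Int)) : List (Int × List Int) :=
  ((PySem.List.enumerate elements 0).foldl
    (fun d p => p.2.foldl (cviStep p.1) d) PySem.Dict.empty).items

-- ===== PORT B =====
-- Source B's 'rank = {v: j for j, v in enumerate(keys)}'
def cviRank (keys : List Int) : PySem.Dict Int Int :=
  PySem.Dict.ofList ((PySem.List.enumerate keys 0).map (fun p => (p.2, p.1)))

-- rank[v] and buckets[rank[v]] are ported by total-form lookups (getD/pyGetD/pySetD);
-- they are exact here because every pair's vertex occurs in keys, so rank[v] is a valid index.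
def compute_vertex_to_indices_py_alt (elements : List (List Int)) : List (Int × List Int) :=
  let pairs := (PySem.List.enumerate elements 0).flatMap (fun p => p.2.map (fun v => (v, p.1)))
  let keys := PySem.List.dedup (pairs.map Prod.fst)
  let rank := cviRank keys
  let buckets := pairs.foldl
    (fun bs q => PySem.List.pySetD bs (rank.getD q.1 0)
        (PySem.List.pyGetD bs (rank.getD q.1 0) [] ++ [q.2]))
    (keys.map (fun _ => ([] : List Int)))
  keys.zip buckets

-- ===== PRECONDITION & SPEC =====
def Spec_compute_vertex_to_indices_py (elements : List (List Int)) (out : List (Int × List Int)) : Prop := out = compute_vertex_to_indices_py_alt elements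
instance (elements : List (List Int)) (out : List (Int × List Int)) : Decidable (Spec_compute_vertex_to_indices_py elements out) := by unfold Spec_compute_vertex_to_indices_py; infer_instance

-- ===== CLAIM (what is proved, stated in full; the proofs are below) =====
def Claim_equal_compute_vertex_to_indices_py : Prop := ∀ (elements : List (List Int)), Dom_compute_vertex_to_indices_py elements → Spec_compute_vertex_to_indices_py elements (compute_vertex_to_indices_py elements)

-- ===== LEMMAS AND PROOFS =====

-- A's step always equals a single dict 'modify with append', whether the key is new or not
theorem cviStep_eq_modify (i v : Int) (d : PySem.Dict Int (List Int)) :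
    cviStep i d v = d.modify v [] (fun l => l ++ [i]) := by
  unfold cviStep
  by_cases h : d.contains v = true
  · simp [h]
  · simp [h, PySem.Dict.modify, PySem.Dict.insert_insert_self, PySem.Dict.getD_insert_self,
          PySem.Dict.getD_of_not_contains]

-- A's inner loop over one element is the modify-fold over that element's (vertex, index) pairs
theorem cvi_inner (i : Int) (el : List Int) (d : PySem.Dict Int (List Int)) :
    el.foldl (cviStep i) d =
      (el.map (fun v => (v, i))).foldl (fun d q => d.modify q.1 [] (fun l => l ++ [q.2])) d := by
  induction el generalizing d with
  | nil => rfl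
  | cons x xs ih => simp only [List.foldl_cons, List.map_cons, ih, cviStep_eq_modify]

-- A's nested loops are the modify-fold over the flattened (vertex, index) pair list
theorem cvi_outer (ps : List (Int × List Int)) (d : PySem.Dict Int (List Int)) :
    ps.foldl (fun d p => p.2.foldl (cviStep p.1) d) d =
      (ps.flatMap (fun p => p.2.map (fun v => (v, p.1)))).foldl
        (fun d q => d.modify q.1 [] (fun l => l ++ [q.2])) d := by
  induction ps generalizing d with
  | nil => rfl
  | cons p ps ih =>
      simp only [List.foldl_cons, List.flatMap_cons, List.foldl_append]
      rw [cvi_inner, ih]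

-- B's rank dict is the literal (v, position) association list when keys is duplicate-free
theorem cviRank_items (keys : List Int) (h : keys.Nodup) :
    (cviRank keys).items = (PySem.List.enumerate keys 0).map (fun p => (p.2, p.1)) := by
  have hfst : (((PySem.List.enumerate keys 0).map (fun p => (p.2, p.1))).map Prod.fst).Nodup := by
    have h2 : ((PySem.List.enumerate keys 0).map (fun p => (p.2, p.1))).map Prod.fst
        = (PySem.List.enumerate keys 0).map (·.2) := by
      simp [List.map_map, Function.comp_def]
    rw [h2, PySem.List.map_snd_enumerate]; exact h
  have := PySem.Dict.items_foldl_insert_fresh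
      (l := (PySem.List.enumerate keys 0).map (fun p => (p.2, p.1)))
      (k := Prod.fst) (v := Prod.snd) (d := PySem.Dict.empty)
      (by intro a _; rfl) hfst
  simpa [cviRank, PySem.Dict.ofList, PySem.Dict.update] using this

theorem cviRank_keys_nodup (keys : List Int) : (cviRank keys).keys.Nodup :=
  PySem.Dict.nodup_keys_ofList _

-- B's rank lookup is the first-occurrence position of v in keys
theorem cviRank_getD (keys : List Int) (h : keys.Nodup) (v : Int) (hv : v ∈ keys) :
    (cviRank keys).getD v 0 = (keys.idxOf v : Int) := by
  have hlt : keys.idxOf v < keys.length := List.idxOf_lt_length_of_mem hv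
  have hmem : (v, (keys.idxOf v : Int)) ∈ (cviRank keys).items := by
    rw [cviRank_items keys h]
    refine List.mem_map.mpr ⟨((keys.idxOf v : Int), v), ?_, ?_⟩
    · exact (PySem.List.mem_enumerate_iff _ _ _).mpr
        ⟨keys.idxOf v, hlt, by simp [List.getElem_idxOf]⟩
    · rfl
  exact PySem.Dict.getD_of_mem_items _ hmem (cviRank_keys_nodup keys) 0

-- one scatter step of B: append i to the bucket of v, expressed pointwise over keys
theorem cvi_step (keys : List Int) (hnd : keys.Nodup) (f : Int → List Int)
    (v i : Int) (hv : v ∈ keys) :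
    PySem.List.pySetD (keys.map f) ((cviRank keys).getD v 0)
        (PySem.List.pyGetD (keys.map f) ((cviRank keys).getD v 0) [] ++ [i])
      = keys.map (fun w => f w ++ if w = v then [i] else []) := by
  have hlt : keys.idxOf v < keys.length := List.idxOf_lt_length_of_mem hv
  rw [cviRank_getD keys hnd v hv]
  rw [PySem.List.pySetD_natCast, PySem.List.pyGetD_natCast]
  apply List.ext_getElem (by simp)
  intro m h1 h2
  have hm : m < keys.length := by simpa using h1
  rw [List.getElem_set]
  by_cases hmv : m = keys.idxOf v
  · subst hmv
    simp [List.getD, List.getElem?_eq_getElem (by simpa using hlt), List.getElem_idxOf hlt]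
  · have hne : keys[m] ≠ v := by
      intro hEq
      exact hmv (hnd.getElem_inj_iff.mp (by rw [hEq, List.getElem_idxOf hlt]))
    have hmv' : ¬ List.idxOf v keys = m := fun h => hmv h.symm
    simp [hmv', hne]

-- B's scatter loop fills each bucket with exactly the indices of its vertex's pairs
theorem cvi_buckets (keys : List Int) (hnd : keys.Nodup) :
    ∀ (P : List (Int × Int)) (f : Int → List Int), (∀ q ∈ P, q.1 ∈ keys) →
      P.foldl (fun bs q => PySem.List.pySetD bs ((cviRank keys).getD q.1 0)
          (PySem.List.pyGetD bs ((cviRank keys).getD q.1 0) [] ++ [q.2])) (keys.map f)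
        = keys.map (fun w => f w ++ (P.filter (fun q => q.1 == w)).map Prod.snd) := by
  intro P
  induction P with
  | nil => intro f _; simp
  | cons q P ih =>
      intro f hmem
      rw [List.foldl_cons, cvi_step keys hnd f q.1 q.2 (hmem q (by simp)),
          ih _ (fun r hr => hmem r (by simp [hr]))]
      apply List.map_congr_left
      intro w hw
      by_cases hqw : q.1 = w
      · simp [hqw]
      · have : ¬ (w = q.1) := fun h => hqw h.symm
        simp [hqw, this]

theorem zip_map_self (l : List Int) (g : Int → List Int) :
    l.zip (l.map g) = l.map (fun x => (x, g x)) := by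
  induction l with
  | nil => rfl
  | cons x xs ih => simp [ih]

-- ===== VERDICT (by name: the statement is the Claim_ definition above) =====
theorem compute_vertex_to_indices_py_spec : Claim_equal_compute_vertex_to_indices_py := by
  intro elements _
  unfold Spec_compute_vertex_to_indices_py
  unfold compute_vertex_to_indices_py compute_vertex_to_indices_py_alt
  dsimp only
  rw [cvi_outer]
  set L := (PySem.List.enumerate elements 0).flatMap (fun p => p.2.map (fun v => (v, p.1))) with hL
  set keys := PySem.List.dedup (L.map Prod.fst) with hkeys
  have hnd : keys.Nodup := by rw [hkeys]; exact PySem.List.nodup_dedup _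
  have hall : ∀ q ∈ L, q.1 ∈ keys := by
    intro q hq
    rw [hkeys]
    exact (PySem.List.mem_dedup _ _).mpr (List.mem_map.mpr ⟨q, hq, rfl⟩)
  -- B side: buckets characterization, then zip over keys
  rw [cvi_buckets keys hnd L (fun _ => []) hall, zip_map_self]
  -- A side: items of the modify-fold as a map over its (duplicate-free) keys
  have hndk : (L.foldl (fun d q => d.modify q.1 [] (fun l => l ++ [q.2])) PySem.Dict.empty).keys.Nodup :=
    PySem.Dict.nodup_keys_foldl_modify_key L Prod.fst [] (fun d q => fun l => l ++ [q.2])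
      PySem.Dict.empty (by simp)
  have hK : (L.foldl (fun d q => d.modify q.1 [] (fun l => l ++ [q.2])) PySem.Dict.empty).keys = keys := by
    rw [PySem.Dict.keys_foldl_modify_key]
    simp [PySem.Dict.keys_empty, PySem.Set.update_nil_left, hkeys]
  rw [PySem.Dict.items_eq_map_keys _ hndk [], hK]
  apply List.map_congr_left
  intro k hk
  rw [PySem.Dict.getD_foldl_modify_append]
  simp [PySem.Dict.getD_empty]
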